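-- pv_equiv track=rewrite | github.com/muratalpaslan/techcareer-yazkampi | Week3.py | sayi_blok_toplami
-- ===== SOURCE A (Python) =====
-- def sayi_blok_toplami(s: str) -> int:
--     toplam = 0
--     biriken = ""  # ardışık rakamları burada biriktir
--
--     for ch in s:
--         if ch.isdigit():
--             biriken += ch
--         else:
--             if biriken != "":
--                 toplam += int(biriken)
--                 biriken = ""
--     # string rakamla bittiyse son bloğu ekle
--     if biriken != "":
--         toplam += int(biriken)
--
--     return toplam
-- ===== SOURCE B (Python) =====
-- def sayi_blok_toplami(s: str) -> int:
--     total = 0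
--     i = 0
--     n = len(s)
--     while i < n:
--         if s[i].isdigit():
--             j = i
--             while j < n and s[j].isdigit():
--                 j += 1
--             total += int(s[i:j])
--             i = j
--         else:
--             i += 1
--     return total
-- ===== Notes on version B (the rewrite author's own statement) =====
-- stated objective: alternative
-- what changed: B replaces A's char-by-char fold with a mutable accumulator string by index-based span scanning: it jumps to the end of each maximal digit run with an inner scan and converts the slice at once, keeping no accumulator between iterations.
import Mathlib
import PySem

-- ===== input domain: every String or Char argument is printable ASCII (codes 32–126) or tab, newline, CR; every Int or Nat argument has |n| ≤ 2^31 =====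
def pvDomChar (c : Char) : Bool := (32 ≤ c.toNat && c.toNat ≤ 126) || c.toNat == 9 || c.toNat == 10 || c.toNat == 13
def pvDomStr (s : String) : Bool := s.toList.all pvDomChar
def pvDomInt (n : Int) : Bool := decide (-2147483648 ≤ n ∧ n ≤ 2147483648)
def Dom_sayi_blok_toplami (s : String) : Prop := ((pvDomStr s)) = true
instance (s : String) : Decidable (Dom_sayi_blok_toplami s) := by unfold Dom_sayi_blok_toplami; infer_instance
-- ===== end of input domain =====

-- B replaces A's char-by-char fold with an accumulator string by index-based span scanning
-- over maximal digit runs (alternative decomposition; same O(n) cost).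
-- int(biriken) where biriken is a nonempty run of ASCII digits: ofChars? is `some` there,
-- so the .getD 0 default is never used on the inputs either port reaches it with.
def pvIntStr (b : List Char) : Int := (PySem.Int.ofChars? b).getD 0

-- ===== PORT A =====
def pvStepA (st : Int × List Char) (ch : Char) : Int × List Char :=
  if PySem.Chars.isdigit ch then (st.1, st.2 ++ [ch])
  else if st.2 ≠ [] then (st.1 + pvIntStr st.2, []) else st

def sayi_blok_toplami (s : String) : Int :=
  let st := s.toList.foldl pvStepA (0, [])
  if st.2 ≠ [] then st.1 + pvIntStr st.2 else st.1

-- ===== PORT B =====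
def pvSumRuns : List Char → Int
  | [] => 0
  | c :: cs =>
    if PySem.Chars.isdigit c then
      let run := cs.takeWhile PySem.Chars.isdigit
      pvIntStr (c :: run) + pvSumRuns (cs.drop run.length)
    else
      pvSumRuns cs
termination_by l => l.length
decreasing_by
  · simp only [List.length_cons, List.length_drop]; omega
  · simp

def sayi_blok_toplami_alt (s : String) : Int := pvSumRuns s.toList

-- ===== PRECONDITION & SPEC =====
def Spec_sayi_blok_toplami (s : String) (out : Int) : Prop := out = sayi_blok_toplami_alt s
instance (s : String) (out : Int) : Decidable (Spec_sayi_blok_toplami s out) := by unfold Spec_sayi_blok_toplami; infer_instance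

-- ===== CLAIM (what is proved, stated in full; the proofs are below) =====
def Claim_equal_sayi_blok_toplami : Prop := ∀ (s : String), Dom_sayi_blok_toplami s → Spec_sayi_blok_toplami s (sayi_blok_toplami s)

-- ===== LEMMAS AND PROOFS =====

-- folding A's step over a run of digits just appends them to the accumulator
theorem pvFoldA_digits (d : List Char) (hd : ∀ c ∈ d, PySem.Chars.isdigit c = true) :
    ∀ (r : List Char) (t : Int) (b : List Char),
      (d ++ r).foldl pvStepA (t, b) = r.foldl pvStepA (t, b ++ d) := by
  induction d with
  | nil => intro r t b; simp
  | cons c cs ih =>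
    intro r t b
    have hc : PySem.Chars.isdigit c = true := hd c (by simp)
    simp only [List.cons_append, List.foldl_cons, pvStepA, hc, if_pos]
    rw [ih (fun x hx => hd x (by simp [hx])) r t (b ++ [c])]
    simp

-- A's finishing step
def pvFinish (st : Int × List Char) : Int := if st.2 ≠ [] then st.1 + pvIntStr st.2 else st.1

theorem pvDropWhile_head (p : Char → Bool) :
    ∀ (l : List Char) (x : Char) (xs : List Char), l.dropWhile p = x :: xs → p x = false := by
  intro l
  induction l with
  | nil => intro x xs h; simp [List.dropWhile] at h
  | cons c cs ih =>
    intro x xs h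
    by_cases hc : p c = true
    · rw [List.dropWhile_cons_of_pos hc] at h; exact ih x xs h
    · rw [List.dropWhile_cons_of_neg hc] at h
      cases h; simpa using hc

theorem pvMainAux : ∀ (n : Nat) (l : List Char), l.length ≤ n → ∀ (t : Int),
    pvFinish (l.foldl pvStepA (t, [])) = t + pvSumRuns l := by
  intro n
  induction n with
  | zero =>
    intro l hl t
    have : l = [] := List.eq_nil_of_length_eq_zero (Nat.le_zero.mp hl)
    subst this; simp [pvFinish, pvSumRuns]
  | succ m ih =>
    intro l hl t
    cases l with
    | nil => simp [pvFinish, pvSumRuns]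
    | cons c cs =>
      have hcs : cs.length ≤ m := by simpa using Nat.lt_succ_iff.mp (by simpa using hl)
      by_cases hc : PySem.Chars.isdigit c = true
      · -- digit head: a maximal run starts here
        set run := cs.takeWhile PySem.Chars.isdigit with hrun
        set dw := cs.dropWhile PySem.Chars.isdigit with hdw
        have hsplit : run ++ dw = cs := List.takeWhile_append_dropWhile
        have hdrop : cs.drop run.length = dw := by
          conv_lhs => rw [← hsplit]
          exact List.drop_left
        have hrd : ∀ x ∈ run, PySem.Chars.isdigit x = true := by
          intro x hx; exact List.mem_takeWhile_imp (hrun ▸ hx)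
        have hstep1 : (c :: cs).foldl pvStepA (t, []) = dw.foldl pvStepA (t, c :: run) := by
          conv_lhs => rw [← hsplit]
          rw [show (c :: (run ++ dw)) = (c :: run) ++ dw by simp]
          rw [pvFoldA_digits (c :: run) (by intro x hx; rcases List.mem_cons.mp hx with h | h
                                            · exact h ▸ hc
                                            · exact hrd x h) dw t []]
          simp
        have hsum : pvSumRuns (c :: cs) = pvIntStr (c :: run) + pvSumRuns dw := by
          rw [pvSumRuns, if_pos hc]
          simp only [← hrun, hdrop]
        cases hdwc : dw with
        | nil =>
          rw [hstep1, hdwc]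
          simp only [List.foldl_nil, pvFinish]
          rw [hsum, hdwc]
          simp [pvSumRuns]
        | cons x xs =>
          have hx : PySem.Chars.isdigit x = false := pvDropWhile_head _ cs x xs (hdw ▸ hdwc)
          have hxs : xs.length ≤ m := by
            have : dw.length ≤ cs.length := hdw ▸ List.length_dropWhile_le _ _
            rw [hdwc] at this; simp at this; omega
          rw [hstep1, hdwc]
          simp only [List.foldl_cons, pvStepA, hx, Bool.false_eq_true, if_false, ne_eq,
            List.cons_ne_nil, not_false_eq_true, if_pos]
          rw [ih xs hxs (t + pvIntStr (c :: run)), hsum, hdwc]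
          rw [pvSumRuns, if_neg (by simp [hx])]
          ring
      · -- non-digit head: state unchanged
        have hstep : pvStepA (t, []) c = (t, []) := by
          simp [pvStepA, hc]
        rw [List.foldl_cons, hstep, ih cs hcs t, pvSumRuns, if_neg hc]

theorem pvMain (l : List Char) : ∀ (t : Int),
    pvFinish (l.foldl pvStepA (t, [])) = t + pvSumRuns l :=
  fun t => pvMainAux l.length l (le_refl _) t

-- ===== VERDICT (by name: the statement is the Claim_ definition above) =====
theorem sayi_blok_toplami_spec : Claim_equal_sayi_blok_toplami := by
  intro s _
  show _ = _
  have := pvMain s.toList 0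
  simpa [sayi_blok_toplami, sayi_blok_toplami_alt, pvFinish] using this
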